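-- pv_equiv track=rewrite | github.com/qsantos/crpyt | digests/digest.py | int_from_list
-- ===== SOURCE A (Python) =====
-- def int_from_list(l, byteorder):
-- 	if byteorder == 'little':
-- 		return int_from_list(l[::-1], 'big')
-- 	r = 0
-- 	for b in l:
-- 		r *= 256
-- 		r += b
-- 	return r
-- ===== SOURCE B (Python) =====
-- def int_from_list(l, byteorder):
--     bs = l[::-1] if byteorder == 'little' else l
--     n = len(bs)
--     return sum(b << (8 * (n - 1 - i)) for i, b in enumerate(bs))
-- ===== Notes on version B (the rewrite author's own statement) =====
-- stated objective: alternative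
-- what changed: Replaces the Horner accumulator loop (and the recursive call for 'little') with a single positional weighted sum: each byte is shifted by 8*(position from the end) and summed.
import Mathlib
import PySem

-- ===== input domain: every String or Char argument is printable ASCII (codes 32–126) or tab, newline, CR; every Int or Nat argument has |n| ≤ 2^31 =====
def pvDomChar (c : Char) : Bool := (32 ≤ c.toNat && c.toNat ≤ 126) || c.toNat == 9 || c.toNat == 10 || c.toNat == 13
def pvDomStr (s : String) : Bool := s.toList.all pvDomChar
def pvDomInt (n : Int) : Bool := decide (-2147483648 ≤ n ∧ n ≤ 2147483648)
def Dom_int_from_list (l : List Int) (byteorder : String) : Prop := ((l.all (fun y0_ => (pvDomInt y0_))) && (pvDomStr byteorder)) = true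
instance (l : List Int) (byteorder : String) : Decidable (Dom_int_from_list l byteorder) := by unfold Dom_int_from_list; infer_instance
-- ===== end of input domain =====

-- B replaces A's Horner accumulator loop (and its recursive call for 'little') by a single
-- positional weighted sum over the enumerated bytes; same O(n) cost (objective: alternative).

-- ===== PORT A =====
def int_from_list (l : List Int) (byteorder : String) : Int :=
  if byteorder == "little" then
    int_from_list ((PySem.List.slice? l none none (-1)).getD []) "big"
  else
    l.foldl (fun r b => r * 256 + b) 0
termination_by (if byteorder == "little" then 1 else 0 : Nat)
decreasing_by simp_all

-- ===== PORT B =====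
def int_from_list_alt (l : List Int) (byteorder : String) : Int :=
  let bs := if byteorder == "little" then (PySem.List.slice? l none none (-1)).getD [] else l
  ((PySem.List.enumerate bs).map
    (fun p => p.2 * 2 ^ (8 * ((bs.length : Int) - 1 - p.1)).toNat)).sum

-- ===== PRECONDITION & SPEC =====
def Spec_int_from_list (l : List Int) (byteorder : String) (out : Int) : Prop := out = int_from_list_alt l byteorder
instance (l : List Int) (byteorder : String) (out : Int) : Decidable (Spec_int_from_list l byteorder out) := by unfold Spec_int_from_list; infer_instance

-- ===== CLAIM (what is proved, stated in full; the proofs are below) =====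
def Claim_equal_int_from_list : Prop := ∀ (l : List Int) (byteorder : String), Dom_int_from_list l byteorder → Spec_int_from_list l byteorder (int_from_list l byteorder)

-- ===== LEMMAS AND PROOFS =====

-- Horner fold from accumulator a equals a·256^n plus the positional weighted sum (start s ≥ 0 generalizes the enumeration index).
theorem horner_eq_weighted (bs : List Int) (a s : Int) :
    bs.foldl (fun r b => r * 256 + b) a
      = a * 2 ^ (8 * bs.length)
        + ((PySem.List.enumerate bs s).map
            (fun p => p.2 * 2 ^ (8 * (s + (bs.length : Int) - 1 - p.1)).toNat)).sum := by
  induction bs generalizing a s with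
  | nil => simp [PySem.List.enumerate_nil]
  | cons b t ih =>
    rw [List.foldl_cons, PySem.List.enumerate_cons, List.map_cons, List.sum_cons,
      ih (a * 256 + b) (s + 1)]
    have h1 : (8 * (s + ((b :: t).length : Int) - 1 - s)).toNat = 8 * t.length := by
      simp only [List.length_cons]; push_cast; omega
    have h2 : ((PySem.List.enumerate t (s + 1)).map
          (fun p => p.2 * 2 ^ (8 * (s + (((b :: t).length : Int)) - 1 - p.1)).toNat))
        = ((PySem.List.enumerate t (s + 1)).map
          (fun p => p.2 * 2 ^ (8 * ((s + 1) + ((t.length : Int)) - 1 - p.1)).toNat)) := by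
      apply List.map_congr_left
      intro p _
      have : s + (((b :: t).length : Int)) - 1 - p.1 = (s + 1) + ((t.length : Int)) - 1 - p.1 := by
        simp only [List.length_cons]; push_cast; ring
      rw [this]
    rw [h1, h2]
    have hpow : (2 : Int) ^ (8 * (b :: t).length) = 2 ^ (8 * t.length) * 256 := by
      simp only [List.length_cons]
      rw [show 8 * (t.length + 1) = 8 * t.length + 8 by ring, pow_add]; norm_num
    rw [hpow]
    ring

theorem fold_eq_alt_body (bs : List Int) :
    bs.foldl (fun r b => r * 256 + b) 0
      = ((PySem.List.enumerate bs).map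
          (fun p => p.2 * 2 ^ (8 * ((bs.length : Int) - 1 - p.1)).toNat)).sum := by
  have h := horner_eq_weighted bs 0 0
  simpa using h

-- ===== VERDICT (by name: the statement is the Claim_ definition above) =====
theorem int_from_list_spec : Claim_equal_int_from_list := by
  intro l byteorder _
  unfold Spec_int_from_list int_from_list_alt
  by_cases h : byteorder == "little"
  · rw [int_from_list, if_pos h, int_from_list, if_neg (by decide), if_pos h]
    exact fold_eq_alt_body _
  · rw [int_from_list, if_neg h, if_neg h]
    exact fold_eq_alt_body _
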